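-- pv_equiv track=rewrite | github.com/George-Petrovski/LeetCode-problems | python solutions/Polar_iv_question1.py | minChairs
-- ===== SOURCE A (Python) =====
-- def minChairs(simulations):
--     # Write your code here
--     res = []
--     for i in simulations:
--         total = 0
--         available = 0
--         for j in i:
--             if j == "C" and available == 0:
--                 total += 1
--             elif j == "C" and available > 0:
--                 available -= 1
--             elif j == "R":
--                 available += 1
--             elif j == "U" and available == 0:
--                 total += 1
--             elif j == "U" and available > 0:
--                 available -= 1
--             elif j == "L":
--                 available += 1
--         res.append(total)
--     return res
-- ===== SOURCE B (Python) =====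
-- def minChairs(simulations):
--     res = []
--     for s in simulations:
--         cnt = 0
--         peak = 0
--         for j in s:
--             if j == "C" or j == "U":
--                 cnt += 1
--             elif j == "R" or j == "L":
--                 cnt -= 1
--             if cnt > peak:
--                 peak = cnt
--         res.append(peak)
--     return res
-- ===== Notes on version B (the rewrite author's own statement) =====
-- stated objective: simpler
-- what changed: Replaces the available/total chair-pool bookkeeping and six-way if-chain with a single signed running-occupancy counter whose running maximum is the answer.
import Mathlib
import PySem

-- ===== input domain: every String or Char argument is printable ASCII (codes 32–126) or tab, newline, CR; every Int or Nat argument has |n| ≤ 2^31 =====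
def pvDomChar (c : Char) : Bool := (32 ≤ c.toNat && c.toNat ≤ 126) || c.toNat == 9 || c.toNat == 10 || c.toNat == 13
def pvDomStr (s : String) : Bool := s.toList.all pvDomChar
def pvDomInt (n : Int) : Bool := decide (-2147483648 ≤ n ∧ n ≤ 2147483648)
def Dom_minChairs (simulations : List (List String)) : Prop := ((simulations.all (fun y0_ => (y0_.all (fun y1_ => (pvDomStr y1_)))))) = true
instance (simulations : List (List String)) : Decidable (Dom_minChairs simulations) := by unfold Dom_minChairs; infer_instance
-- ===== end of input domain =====

-- B replaces A's available/total chair-pool bookkeeping with a running signed occupancy counter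
-- whose running maximum is the answer (objective: simpler; same asymptotic cost).

-- ===== PORT A =====
-- A's inner loop state: (total, available); branches in A's order.
def minChairsStepA (s : Int × Int) (j : String) : Int × Int :=
  if j = "C" ∧ s.2 = 0 then (s.1 + 1, s.2)
  else if j = "C" ∧ s.2 > 0 then (s.1, s.2 - 1)
  else if j = "R" then (s.1, s.2 + 1)
  else if j = "U" ∧ s.2 = 0 then (s.1 + 1, s.2)
  else if j = "U" ∧ s.2 > 0 then (s.1, s.2 - 1)
  else if j = "L" then (s.1, s.2 + 1)
  else s

def minChairs (simulations : List (List String)) : List Int :=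
  simulations.map (fun i => (i.foldl minChairsStepA (0, 0)).1)

-- ===== PORT B =====
-- B's inner loop state: (cnt, peak).
def minChairsStepB (s : Int × Int) (j : String) : Int × Int :=
  let cnt := if j = "C" ∨ j = "U" then s.1 + 1
             else if j = "R" ∨ j = "L" then s.1 - 1
             else s.1
  (cnt, if cnt > s.2 then cnt else s.2)

def minChairs_alt (simulations : List (List String)) : List Int :=
  simulations.map (fun s => (s.foldl minChairsStepB (0, 0)).2)

-- ===== PRECONDITION & SPEC =====
def Spec_minChairs (simulations : List (List String)) (out : List Int) : Prop := out = minChairs_alt simulations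
instance (simulations : List (List String)) (out : List Int) : Decidable (Spec_minChairs simulations out) := by unfold Spec_minChairs; infer_instance

-- ===== CLAIM (what is proved, stated in full; the proofs are below) =====
def Claim_equal_minChairs : Prop := ∀ (simulations : List (List String)), Dom_minChairs simulations → Spec_minChairs simulations (minChairs simulations)

-- ===== LEMMAS AND PROOFS =====

-- Invariant linking the two loop states: A's (total, available) with available = total - cnt,
-- B's (cnt, peak) with peak = total and cnt ≤ total.
theorem minChairs_loop_eq : ∀ (l : List String) (total cnt : Int), cnt ≤ total →
    (l.foldl minChairsStepA (total, total - cnt)).1 = (l.foldl minChairsStepB (cnt, total)).2 := by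
  intro l
  induction l with
  | nil => intro total cnt _; simp
  | cons j l ih =>
    intro total cnt hle
    simp only [List.foldl_cons]
    by_cases hC : j = "C" ∨ j = "U"
    · by_cases h0 : cnt = total
      · have hA : minChairsStepA (total, total - cnt) j = (total + 1, (total + 1) - (cnt + 1)) := by
          rcases hC with h | h <;> subst h <;> simp only [minChairsStepA] <;>
            split_ifs <;> simp_all
        have hB : minChairsStepB (cnt, total) j = (cnt + 1, total + 1) := by
          rcases hC with h | h <;> subst h <;> simp [minChairsStepB, h0]
        rw [hA, hB]; exact ih (total + 1) (cnt + 1) (by omega)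
      · have hA : minChairsStepA (total, total - cnt) j = (total, total - (cnt + 1)) := by
          rcases hC with h | h <;> subst h <;> simp only [minChairsStepA] <;>
            split_ifs <;> simp_all [Prod.ext_iff] <;> omega
        have hB : minChairsStepB (cnt, total) j = (cnt + 1, total) := by
          rcases hC with h | h <;> subst h <;> simp [minChairsStepB, Prod.ext_iff] <;> omega
        rw [hA, hB]; exact ih total (cnt + 1) (by omega)
    · by_cases hRL : j = "R" ∨ j = "L"
      · have hA : minChairsStepA (total, total - cnt) j = (total, total - (cnt - 1)) := by
          rcases hRL with h | h <;> subst h <;> simp only [minChairsStepA] <;>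
            split_ifs <;> simp_all [Prod.ext_iff] <;> omega
        have hB : minChairsStepB (cnt, total) j = (cnt - 1, total) := by
          have h1 : ¬ (j = "C" ∨ j = "U") := hC
          rcases hRL with h | h <;> subst h <;> simp_all [minChairsStepB, Prod.ext_iff] <;> omega
        rw [hA, hB]; exact ih total (cnt - 1) (by omega)
      · have hA : minChairsStepA (total, total - cnt) j = (total, total - cnt) := by
          simp only [not_or] at hC hRL
          simp [minChairsStepA, hC.1, hC.2, hRL.1, hRL.2]
        have hB : minChairsStepB (cnt, total) j = (cnt, total) := by
          simp [minChairsStepB, Prod.ext_iff, hC, hRL]; omega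
        rw [hA, hB]; exact ih total cnt hle

-- ===== VERDICT (by name: the statement is the Claim_ definition above) =====
theorem minChairs_spec : Claim_equal_minChairs := by
  intro simulations _
  unfold Spec_minChairs minChairs minChairs_alt
  apply List.map_congr_left
  intro i _
  have := minChairs_loop_eq i 0 0 (le_refl 0)
  simpa using this
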